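-- pv_equiv track=rewrite | github.com/cafrii/omega2 | 백준/Gold/1577. 도로의 개수/a1577.py | solve
-- ===== SOURCE A (Python) =====
-- def solve(W:int, H:int, Ks:list[tuple[int,int,int,int]])->int:
--     '''
--     Args:
--         W: width, x 크기, H: height, y 크기
--         Ks: [ (x1,y1,x2,y2), ... ]
--     Returns:
--         number of shortest cases
--     Info:
--         이 함수에서 사용하는 2-d array 는 [y][x] 순이다.
--     '''
--     # log("dp: %dx%d, Ks: %s", H, W, Ks)
--
--     # path availability at each location for specific (x or y) direction
--     ok_x = [ [1]*(W+1) for _ in range(H+1) ]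
--     ok_y = [ [1]*(W+1) for _ in range(H+1) ]
--     # ex:
--     #  ok_x[y][x] == 1 이면 (y,x-1) 과 (y,x) 사이의 통행이 가능.
--     #  ok_y[y][x] == 1 이면 (y-1,x) 과 (y,x) 사이의 통행이 가능.
--
--     def grid2str(G:list[list[int]], indent:str = '  '):
--         return '\n'.join( indent + ' '.join(map(str, gl)) for gl in G )
--
--
--     for x1,y1,x2,y2 in Ks:
--         if y1 == y2: # this is barrier in x direction
--             ok_x[y1][max(x1, x2)] = 0
--         elif x1 == x2: # in y direction
--             ok_y[max(y1, y2)][x1] = 0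
--
--     # log("ok x:\n%s", grid2str(ok_x))
--     # log("ok y:\n%s", grid2str(ok_y))
--
--     dp = [ [0]*(W+1) for _ in range(H+1) ]
--     # dp[y][x]: 좌표 (x,y) 까지 도달하는 경우의 수
--     # 최종 정답은 dp[H][W]
--
--     dp[0][0] = 1
--
--     for y in range(0, H+1):
--         for x in range(0, W+1):
--             if x==0 and y==0: continue
--             if x>0 and ok_x[y][x]:
--                 dp[y][x] += dp[y][x-1]
--             if y>0 and ok_y[y][x]:
--                 dp[y][x] += dp[y-1][x]
--
--     return dp[H][W]
-- ===== SOURCE B (Python) =====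
-- def solve(W: int, H: int, Ks: list[tuple[int, int, int, int]]) -> int:
--     # barrier preprocessing kept as in the reference
--     ok_x = [[1] * (W + 1) for _ in range(H + 1)]
--     ok_y = [[1] * (W + 1) for _ in range(H + 1)]
--     for x1, y1, x2, y2 in Ks:
--         if y1 == y2:
--             ok_x[y1][max(x1, x2)] = 0
--         elif x1 == x2:
--             ok_y[max(y1, y2)][x1] = 0
--     # push-based frontier propagation: walk the anti-diagonals x+y = 0..W+H,
--     # keeping only the current frontier as a dict {(x, y): path count} and
--     # pushing each cell's count forward through its open right/up edges
--     cur = {(0, 0): 1}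
--     for _ in range(W + H):
--         nxt = {}
--         for (x, y), c in cur.items():
--             if x < W and ok_x[y][x + 1]:
--                 nxt[(x + 1, y)] = nxt.get((x + 1, y), 0) + c
--             if y < H and ok_y[y + 1][x]:
--                 nxt[(x, y + 1)] = nxt.get((x, y + 1), 0) + c
--         cur = nxt
--     return cur.get((W, H), 0)
-- ===== Notes on version B (the rewrite author's own statement) =====
-- stated objective: alternative
-- what changed: A fills a full (H+1)x(W+1) dp table bottom-up, each cell pulling from its left/up predecessors in a row-major double loop; B never builds a dp table: it propagates counts forward along anti-diagonal frontiers, keeping only the current frontier as a dict and pushing each cell's count through its open right/up edges.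
import Mathlib
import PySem

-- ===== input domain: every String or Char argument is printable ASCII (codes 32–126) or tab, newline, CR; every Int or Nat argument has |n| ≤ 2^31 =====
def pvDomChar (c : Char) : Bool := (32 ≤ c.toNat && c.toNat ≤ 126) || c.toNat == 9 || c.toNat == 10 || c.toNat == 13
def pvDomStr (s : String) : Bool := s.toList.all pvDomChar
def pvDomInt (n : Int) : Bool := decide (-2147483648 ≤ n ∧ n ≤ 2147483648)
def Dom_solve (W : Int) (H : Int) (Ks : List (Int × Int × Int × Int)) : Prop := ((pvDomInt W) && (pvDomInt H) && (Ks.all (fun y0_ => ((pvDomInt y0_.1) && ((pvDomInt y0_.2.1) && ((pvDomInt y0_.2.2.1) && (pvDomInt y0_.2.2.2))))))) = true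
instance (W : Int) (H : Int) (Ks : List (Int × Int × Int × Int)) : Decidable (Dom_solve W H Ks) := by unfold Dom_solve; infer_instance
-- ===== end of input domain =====

-- A sweeps a full (H+1)x(W+1) dp table bottom-up, each cell pulling from its
-- predecessors; B keeps no dp table: it pushes counts forward along anti-diagonal
-- frontiers held in a dict.  The barrier preprocessing is identical in both (shared helper okGrids).
-- Python lists are represented by Array with hand-written indexing helpers
-- (pyIdxN/aGet/set2), exact for the in-range (incl. negative-wraparound) indices
-- Pre_ admits.

-- ===== PORT A =====
-- Python list index: exact for in-range i including negative wraparound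
-- (an out-of-range index is IndexError in Python; Pre_ excludes those inputs)
def pyIdxN (n : Nat) (i : Int) : Nat := (if i < 0 then i + n else i).toNat

-- row[i] read (in range under Pre_)
def aGet (a : Array Int) (i : Int) : Int := a.getD (pyIdxN a.size i) 0

-- g[i] row read (in range under Pre_)
def rowGet (g : Array (Array Int)) (i : Int) : Array Int := g.getD (pyIdxN g.size i) #[]

-- g[i][j] read
def get2 (g : Array (Array Int)) (i j : Int) : Int := aGet (rowGet g i) j

-- Python's g[i][j] = v
def set2 (g : Array (Array Int)) (i j : Int) (v : Int) : Array (Array Int) :=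
  g.modify (pyIdxN g.size i) (fun row => row.setIfInBounds (pyIdxN row.size j) v)

-- shared barrier preprocessing: builds ok_x, ok_y exactly as both Pythons do
def okGrids (W H : Int) (Ks : List (Int × Int × Int × Int)) :
    Array (Array Int) × Array (Array Int) :=
  let okx := Array.replicate (H + 1).toNat (Array.replicate (W + 1).toNat (1 : Int))
  let oky := Array.replicate (H + 1).toNat (Array.replicate (W + 1).toNat (1 : Int))
  Ks.foldl (fun g k =>
    if k.2.1 = k.2.2.2 then (set2 g.1 k.2.1 (max k.1 k.2.2.1) 0, g.2)
    else if k.1 = k.2.2.1 then (g.1, set2 g.2 (max k.2.1 k.2.2.2) k.1 0)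
    else g) (okx, oky)

-- the body of A's inner loop, one cell update
def stepA (okx oky : Array (Array Int)) (y : Int) (dp : Array (Array Int)) (x : Int) :
    Array (Array Int) :=
  if x = 0 ∧ y = 0 then dp
  else
    let dp1 := if 0 < x ∧ get2 okx y x ≠ 0 then
        set2 dp y x (get2 dp y x + get2 dp y (x - 1)) else dp
    if 0 < y ∧ get2 oky y x ≠ 0 then
        set2 dp1 y x (get2 dp1 y x + get2 dp1 (y - 1) x) else dp1

-- A's bottom-up double loop over the full dp table
def dpA (okx oky : Array (Array Int)) (W H : Int) : Int :=
  let dp0 := Array.replicate (H + 1).toNat (Array.replicate (W + 1).toNat (0 : Int))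
  let dp0 := set2 dp0 0 0 1
  let dp := (PySem.List.pyRange 0 (H + 1) 1).foldl (fun dp y =>
    (PySem.List.pyRange 0 (W + 1) 1).foldl (stepA okx oky y) dp) dp0
  get2 dp H W

def solve (W : Int) (H : Int) (Ks : List (Int × Int × Int × Int)) : Int :=
  let g := okGrids W H Ks
  dpA g.1 g.2 W H

-- ===== PORT B =====
-- one frontier cell ((x, y), c) pushes its count through its open right/up edges
def pushB (okx oky : Array (Array Int)) (W H : Int)
    (nxt : PySem.Dict (Int × Int) Int) (pc : (Int × Int) × Int) : PySem.Dict (Int × Int) Int :=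
  let nxt1 := if pc.1.1 < W ∧ get2 okx pc.1.2 (pc.1.1 + 1) ≠ 0 then
      nxt.modify (pc.1.1 + 1, pc.1.2) 0 (· + pc.2) else nxt
  if pc.1.2 < H ∧ get2 oky (pc.1.2 + 1) pc.1.1 ≠ 0 then
      nxt1.modify (pc.1.1, pc.1.2 + 1) 0 (· + pc.2) else nxt1

-- one anti-diagonal step: build the next frontier from the current one
def stepB (okx oky : Array (Array Int)) (W H : Int)
    (cur : PySem.Dict (Int × Int) Int) : PySem.Dict (Int × Int) Int :=
  cur.items.foldl (pushB okx oky W H) PySem.Dict.empty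

def solve_alt (W : Int) (H : Int) (Ks : List (Int × Int × Int × Int)) : Int :=
  let g := okGrids W H Ks
  (((PySem.List.pyRange 0 (W + H) 1).foldl (fun cur _ => stepB g.1 g.2 W H cur)
    (PySem.Dict.ofList [((0, 0), 1)])).getD (W, H) 0)

-- ===== PRECONDITION & SPEC =====
-- Pre_ excludes exactly the inputs where the Python A raises IndexError: negative W or H
-- (empty rows / empty table, so dp[0][0] = 1 fails), and barriers whose used indices are
-- outside Python's (wraparound-inclusive) range for the (H+1)x(W+1) tables.
def Pre_solve (W : Int) (H : Int) (Ks : List (Int × Int × Int × Int)) : Prop :=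
  0 ≤ W ∧ 0 ≤ H ∧ ∀ k ∈ Ks,
    (k.2.1 = k.2.2.2 →
      PySem.Raise.InRange (H + 1).toNat k.2.1 ∧
      PySem.Raise.InRange (W + 1).toNat (max k.1 k.2.2.1)) ∧
    (k.2.1 ≠ k.2.2.2 → k.1 = k.2.2.1 →
      PySem.Raise.InRange (H + 1).toNat (max k.2.1 k.2.2.2) ∧
      PySem.Raise.InRange (W + 1).toNat k.1)
instance (W : Int) (H : Int) (Ks : List (Int × Int × Int × Int)) : Decidable (Pre_solve W H Ks) := by
  unfold Pre_solve; infer_instance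

def pvWitness_solve : Int × Int × (List (Int × Int × Int × Int)) := (2, 2, [(1, 0, 1, 1), (0, 1, 1, 1)])

def Spec_solve (W : Int) (H : Int) (Ks : List (Int × Int × Int × Int)) (out : Int) : Prop := out = solve_alt W H Ks
instance (W : Int) (H : Int) (Ks : List (Int × Int × Int × Int)) (out : Int) : Decidable (Spec_solve W H Ks out) := by unfold Spec_solve; infer_instance

-- ===== CLAIM (what is proved, stated in full; the proofs are below) =====
def Claim_equal_solve : Prop := ∀ (W : Int) (H : Int) (Ks : List (Int × Int × Int × Int)), Dom_solve W H Ks → Pre_solve W H Ks → Spec_solve W H Ks (solve W H Ks)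

-- ===== LEMMAS AND PROOFS =====

-- the mathematical recurrence both programs compute: number of barrier-respecting
-- monotone paths reaching (x, y)
def fok (okx oky : Array (Array Int)) : Nat → Nat → Int
  | 0, 0 => 1
  | 0, x + 1 => if get2 okx 0 ((x : Int) + 1) ≠ 0 then fok okx oky 0 x else 0
  | y + 1, 0 => if get2 oky ((y : Int) + 1) 0 ≠ 0 then fok okx oky y 0 else 0
  | y + 1, x + 1 =>
      (if get2 okx ((y : Int) + 1) ((x : Int) + 1) ≠ 0 then fok okx oky (y + 1) x else 0)
    + (if get2 oky ((y : Int) + 1) ((x : Int) + 1) ≠ 0 then fok okx oky y (x + 1) else 0)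

-- a table is an M x N grid
def ShapeT (g : Array (Array Int)) (M N : Nat) : Prop :=
  g.size = M ∧ ∀ (i : Nat) (h : i < g.size), g[i].size = N

-- invariant of A's sweep: rows below y (and row y left of x) hold the final
-- counts, the rest of the table is still in its initial state
def InvA (okx oky : Array (Array Int)) (M N : Nat) (y x : Nat) (T : Array (Array Int)) : Prop :=
  ShapeT T M N ∧ ∀ i j : Nat, i < M → j < N →
    get2 T (i : Int) (j : Int) =
      if i < y ∨ (i = y ∧ j < x) then fok okx oky i j else if i = 0 ∧ j = 0 then 1 else 0

theorem pyIdxN_natCast (n : Nat) (i : Nat) : pyIdxN n (i : Int) = i := by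
  rw [pyIdxN, if_neg (by omega)]
  exact Int.toNat_natCast i

theorem getD_of_lt {α : Type} (xs : Array α) (k : Nat) (d : α) (h : k < xs.size) :
    xs.getD k d = xs[k] := by
  rw [Array.getD_eq_getD_getElem?, Array.getElem?_eq_getElem h, Option.getD_some]

theorem getD_of_ge {α : Type} (xs : Array α) (k : Nat) (d : α) (h : xs.size ≤ k) :
    xs.getD k d = d := by
  rw [Array.getD_eq_getD_getElem?, Array.getElem?_eq_none h, Option.getD_none]

theorem get2_natCast (g : Array (Array Int)) (i j : Nat) :
    get2 g (i : Int) (j : Int) = (g.getD i #[]).getD j 0 := by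
  rw [get2, rowGet, pyIdxN_natCast, aGet, pyIdxN_natCast]

theorem shape_set2 (g : Array (Array Int)) (M N : Nat) (hs : ShapeT g M N) (i j : Nat)
    (_hi : i < M) (v : Int) : ShapeT (set2 g (i : Int) (j : Int) v) M N := by
  rw [set2, pyIdxN_natCast]
  refine ⟨by rw [Array.size_modify]; exact hs.1, ?_⟩
  intro k hk
  rw [Array.size_modify] at hk
  rw [Array.getElem_modify (by rw [Array.size_modify]; exact hk)]
  split_ifs with h
  · rw [Array.size_setIfInBounds]
    exact hs.2 k hk
  · exact hs.2 k hk

theorem get2_set2 (g : Array (Array Int)) (M N : Nat) (hs : ShapeT g M N) (i j : Nat)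
    (hi : i < M) (hj : j < N) (v : Int) (i' j' : Nat) :
    get2 (set2 g (i : Int) (j : Int) v) (i' : Int) (j' : Int)
      = if i' = i ∧ j' = j then v else get2 g (i' : Int) (j' : Int) := by
  have hig : i < g.size := hs.1 ▸ hi
  rw [get2_natCast, get2_natCast, set2, pyIdxN_natCast]
  by_cases hi' : i' < M
  · have hi'g : i' < g.size := hs.1 ▸ hi'
    have hi'm : i' < (g.modify i fun row => row.setIfInBounds (pyIdxN row.size (j : Int)) v).size := by
      rw [Array.size_modify]; exact hi'g
    rw [getD_of_lt _ i' #[] hi'm, getD_of_lt g i' #[] hi'g, Array.getElem_modify hi'm]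
    by_cases hii : i = i'
    · subst hii
      rw [if_pos rfl, hs.2 i hi'g, pyIdxN_natCast]
      by_cases hj' : j' < N
      · have hj'N : j' < g[i].size := by rw [hs.2 i hi'g]; exact hj'
        have hj's : j' < (g[i].setIfInBounds j v).size := by
          rw [Array.size_setIfInBounds]; exact hj'N
        rw [getD_of_lt _ j' 0 hj's, getD_of_lt _ j' 0 hj'N, Array.getElem_setIfInBounds hj'N]
        split_ifs with h1 h2 h2 <;> first | rfl | omega
      · have hge : g[i].size ≤ j' := by rw [hs.2 i hi'g]; omega
        have hges : (g[i].setIfInBounds j v).size ≤ j' := by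
          rw [Array.size_setIfInBounds]; exact hge
        rw [getD_of_ge _ j' 0 hges, getD_of_ge _ j' 0 hge, if_neg (by omega)]
    · rw [if_neg hii, if_neg (by omega)]
  · have hge : g.size ≤ i' := by rw [hs.1]; omega
    have hgem : (g.modify i fun row => row.setIfInBounds (pyIdxN row.size (j : Int)) v).size ≤ i' := by
      rw [Array.size_modify]; exact hge
    rw [getD_of_ge _ i' #[] hgem, getD_of_ge g i' #[] hge, if_neg (by omega)]

theorem fok_step (okx oky : Array (Array Int)) (y x : Nat) (hne : ¬(x = 0 ∧ y = 0)) :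
    fok okx oky y x = (if 0 < (x : Int) ∧ get2 okx (y : Int) (x : Int) ≠ 0 then fok okx oky y (x - 1) else 0)
                    + (if 0 < (y : Int) ∧ get2 oky (y : Int) (x : Int) ≠ 0 then fok okx oky (y - 1) x else 0) := by
  match y, x with
  | 0, 0 => exact absurd ⟨rfl, rfl⟩ hne
  | 0, x + 1 =>
      rw [fok]
      push_cast
      have h1 : (0 : Int) < (x : Int) + 1 := by positivity
      simp [h1]
  | y + 1, 0 =>
      rw [fok]
      push_cast
      have h1 : (0 : Int) < (y : Int) + 1 := by positivity
      simp [h1]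
  | y + 1, x + 1 =>
      rw [fok]
      push_cast
      have h1 : (0 : Int) < (x : Int) + 1 := by positivity
      have h2 : (0 : Int) < (y : Int) + 1 := by positivity
      simp [h1, h2]

theorem stepA_inv (okx oky : Array (Array Int)) (M N : Nat) (y x : Nat) (hy : y < M) (hx : x < N)
    (T : Array (Array Int)) (h : InvA okx oky M N y x T) :
    InvA okx oky M N y (x + 1) (stepA okx oky (y : Int) T (x : Int)) := by
  obtain ⟨hsh, hval⟩ := h
  by_cases h00 : x = 0 ∧ y = 0
  · obtain ⟨hx0, hy0⟩ := h00
    subst hx0; subst hy0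
    rw [stepA, if_pos (by norm_num)]
    refine ⟨hsh, ?_⟩
    intro i j hi hj
    rw [hval i j hi hj]
    by_cases hij : i = 0 ∧ j = 0
    · obtain ⟨h1, h2⟩ := hij; subst h1; subst h2
      simp [fok]
    · have c1 : ¬ (i < 0 ∨ (i = 0 ∧ j < 0)) := by omega
      have c2 : ¬ (i < 0 ∨ (i = 0 ∧ j < 1)) := by omega
      rw [if_neg c1, if_neg c2]
  · have hne : ¬ ((x : Int) = 0 ∧ (y : Int) = 0) := by
      intro hc; exact h00 ⟨by exact_mod_cast hc.1, by exact_mod_cast hc.2⟩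
    rw [stepA, if_neg hne]
    -- current value at (y,x) is 0
    have hcur : get2 T (y : Int) (x : Int) = 0 := by
      rw [hval y x hy hx]
      have c : ¬ (y < y ∨ (y = y ∧ x < x)) := by omega
      rw [if_neg c, if_neg (by tauto)]
    -- analyse dp1
    have key : ∀ R : Array (Array Int), ShapeT R M N →
        (∀ i j : Nat, i < M → j < N → get2 R (i : Int) (j : Int) =
          if i = y ∧ j = x then fok okx oky y x else get2 T (i : Int) (j : Int)) →
        InvA okx oky M N y (x + 1) R := by
      intro R hshR hR
      refine ⟨hshR, ?_⟩
      intro i j hi hj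
      rw [hR i j hi hj]
      by_cases hij : i = y ∧ j = x
      · obtain ⟨h1, h2⟩ := hij; subst h1; subst h2
        rw [if_pos ⟨rfl, rfl⟩, if_pos (by omega)]
      · rw [if_neg hij, hval i j hi hj,
          if_congr (by omega : (i < y ∨ (i = y ∧ j < x)) ↔ (i < y ∨ (i = y ∧ j < x + 1))) rfl rfl]
    by_cases hC1 : 0 < (x : Int) ∧ get2 okx (y : Int) (x : Int) ≠ 0
    · rw [if_pos hC1]
      have hx1 : 1 ≤ x := by have := hC1.1; omega
      have hxc : ((x : Int) - 1) = ((x - 1 : Nat) : Int) := by push_cast [hx1]; ring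
      have hleft : get2 T (y : Int) ((x : Int) - 1) = fok okx oky y (x - 1) := by
        rw [hxc, hval y (x - 1) hy (by omega), if_pos (by omega)]
      set dp1 := set2 T (y : Int) (x : Int)
          (get2 T (y : Int) (x : Int) + get2 T (y : Int) ((x : Int) - 1)) with hdp1
      have hdp1sh : ShapeT dp1 M N := shape_set2 T M N hsh y x hy _
      have hdp1get : ∀ i j : Nat, i < M → j < N → get2 dp1 (i : Int) (j : Int)
          = if i = y ∧ j = x then fok okx oky y (x - 1) else get2 T (i : Int) (j : Int) := by
        intro i j hi hj
        rw [hdp1, get2_set2 T M N hsh y x hy hx _ i j, hcur, hleft, zero_add]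
      by_cases hC2 : 0 < (y : Int) ∧ get2 oky (y : Int) (x : Int) ≠ 0
      · rw [if_pos hC2]
        have hy1 : 1 ≤ y := by have := hC2.1; omega
        have hyc : ((y : Int) - 1) = ((y - 1 : Nat) : Int) := by push_cast [hy1]; ring
        have hup : get2 dp1 ((y : Int) - 1) (x : Int) = fok okx oky (y - 1) x := by
          rw [hyc, hdp1get (y - 1) x (by omega) hx, if_neg (by omega),
            hval (y - 1) x (by omega) hx, if_pos (by omega)]
        have hmidv : get2 dp1 (y : Int) (x : Int) = fok okx oky y (x - 1) := by
          rw [hdp1get y x hy hx, if_pos ⟨rfl, rfl⟩]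
        apply key
        · exact shape_set2 dp1 M N hdp1sh y x hy _
        · intro i j hi hj
          rw [get2_set2 dp1 M N hdp1sh y x hy hx _ i j, hmidv, hup]
          by_cases hij : i = y ∧ j = x
          · rw [if_pos hij, if_pos hij, fok_step okx oky y x h00, if_pos hC1, if_pos hC2]
          · rw [if_neg hij, if_neg hij, hdp1get i j hi hj, if_neg hij]
      · rw [if_neg hC2]
        apply key
        · exact hdp1sh
        · intro i j hi hj
          rw [hdp1get i j hi hj]
          by_cases hij : i = y ∧ j = x
          · rw [if_pos hij, if_pos hij, fok_step okx oky y x h00, if_pos hC1, if_neg hC2, add_zero]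
          · rw [if_neg hij, if_neg hij]
    · rw [if_neg hC1]
      by_cases hC2 : 0 < (y : Int) ∧ get2 oky (y : Int) (x : Int) ≠ 0
      · rw [if_pos hC2]
        have hy1 : 1 ≤ y := by have := hC2.1; omega
        have hyc : ((y : Int) - 1) = ((y - 1 : Nat) : Int) := by push_cast [hy1]; ring
        have hup : get2 T ((y : Int) - 1) (x : Int) = fok okx oky (y - 1) x := by
          rw [hyc, hval (y - 1) x (by omega) hx, if_pos (by omega)]
        apply key
        · exact shape_set2 T M N hsh y x hy _
        · intro i j hi hj
          rw [get2_set2 T M N hsh y x hy hx _ i j, hcur, hup, zero_add]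
          by_cases hij : i = y ∧ j = x
          · rw [if_pos hij, if_pos hij, fok_step okx oky y x h00, if_neg hC1, if_pos hC2, zero_add]
          · rw [if_neg hij, if_neg hij]
      · rw [if_neg hC2]
        apply key
        · exact hsh
        · intro i j hi hj
          by_cases hij : i = y ∧ j = x
          · rw [if_pos hij]
            obtain ⟨h1, h2⟩ := hij
            rw [h1, h2, hcur, fok_step okx oky y x h00, if_neg hC1, if_neg hC2, add_zero]
          · rw [if_neg hij]

theorem InvA_roll (okx oky : Array (Array Int)) (M N : Nat) (y : Nat) (T : Array (Array Int))
    (h : InvA okx oky M N y N T) : InvA okx oky M N (y + 1) 0 T := by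
  obtain ⟨hsh, hval⟩ := h
  refine ⟨hsh, ?_⟩
  intro i j hi hj
  rw [hval i j hi hj]
  have : (i < y ∨ (i = y ∧ j < N)) ↔ (i < y + 1 ∨ (i = y + 1 ∧ j < 0)) := by omega
  rw [if_congr this rfl rfl]

theorem foldA_inner (okx oky : Array (Array Int)) (M N : Nat) (y : Nat) (hy : y < M) :
    ∀ x : Nat, x ≤ N → ∀ T, InvA okx oky M N y 0 T →
    InvA okx oky M N y x ((PySem.List.pyRange 0 (x : Int) 1).foldl (stepA okx oky (y : Int)) T) := by
  intro x
  induction x with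
  | zero =>
      intro _ T h
      simp only [Nat.cast_zero]
      rw [PySem.List.pyRange_one_eq_nil (le_refl 0)]
      exact h
  | succ n ih =>
      intro hx T h
      have hc : ((n + 1 : Nat) : Int) = (n : Int) + 1 := by push_cast; ring
      rw [hc, PySem.List.pyRange_one_succ_right (by positivity), List.foldl_append,
        List.foldl_cons, List.foldl_nil]
      exact stepA_inv okx oky M N y n hy (by omega) _ (ih (by omega) T h)

theorem foldA_outer (okx oky : Array (Array Int)) (M N : Nat) :
    ∀ y : Nat, y ≤ M → ∀ T, InvA okx oky M N 0 0 T →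
    InvA okx oky M N y 0 ((PySem.List.pyRange 0 (y : Int) 1).foldl (fun dp yy =>
      (PySem.List.pyRange 0 (N : Int) 1).foldl (stepA okx oky yy) dp) T) := by
  intro y
  induction y with
  | zero =>
      intro _ T h
      simp only [Nat.cast_zero]
      rw [PySem.List.pyRange_one_eq_nil (le_refl 0)]
      exact h
  | succ n ih =>
      intro hy T h
      have hc : ((n + 1 : Nat) : Int) = (n : Int) + 1 := by push_cast; ring
      rw [hc, PySem.List.pyRange_one_succ_right (by positivity), List.foldl_append,
        List.foldl_cons, List.foldl_nil]
      exact InvA_roll okx oky M N n _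
        (foldA_inner okx oky M N n (by omega) N (le_refl N) _ (ih (by omega) T h))

theorem InvA_init (okx oky : Array (Array Int)) (M N : Nat) (hM : 0 < M) (hN : 0 < N) :
    InvA okx oky M N 0 0 (set2 (Array.replicate M (Array.replicate N (0 : Int))) 0 0 1) := by
  have hsh : ShapeT (Array.replicate M (Array.replicate N (0 : Int))) M N := by
    refine ⟨Array.size_replicate, ?_⟩
    intro i h
    rw [Array.getElem_replicate, Array.size_replicate]
  have hget : ∀ i j : Nat, get2 (Array.replicate M (Array.replicate N (0 : Int))) (i : Int) (j : Int) = 0 := by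
    intro i j
    rw [get2_natCast]
    rcases Nat.lt_or_ge i M with h | h
    · have hi : i < (Array.replicate M (Array.replicate N (0 : Int))).size := by
        rw [Array.size_replicate]; exact h
      rw [getD_of_lt _ i #[] hi, Array.getElem_replicate]
      rcases Nat.lt_or_ge j N with h2 | h2
      · rw [getD_of_lt _ j 0 (by rw [Array.size_replicate]; exact h2), Array.getElem_replicate]
      · rw [getD_of_ge _ j 0 (by rw [Array.size_replicate]; exact h2)]
    · rw [getD_of_ge _ i #[] (by rw [Array.size_replicate]; exact h)]
      rw [getD_of_ge _ j 0 (by norm_num)]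
  have h00 : ((0 : Nat) : Int) = (0 : Int) := by norm_num
  constructor
  · have := shape_set2 _ M N hsh 0 0 hM 1
    rwa [h00] at this
  · intro i j hi hj
    have := get2_set2 _ M N hsh 0 0 hM hN 1 i j
    rw [h00] at this
    have hc : ¬ (i < 0 ∨ (i = 0 ∧ j < 0)) := by omega
    rw [this, hget, if_neg hc]

theorem dpA_eq_fok (okx oky : Array (Array Int)) (W H : Int) (hW : 0 ≤ W) (hH : 0 ≤ H) :
    dpA okx oky W H = fok okx oky H.toNat W.toNat := by
  set M := H.toNat + 1 with hM
  set N := W.toNat + 1 with hN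
  have hWN : (W + 1).toNat = N := by omega
  have hHM : (H + 1).toNat = M := by omega
  have hW1 : W + 1 = ((N : Nat) : Int) := by omega
  have hH1 : H + 1 = ((M : Nat) : Int) := by omega
  have hWc : W = ((W.toNat : Nat) : Int) := by omega
  have hHc : H = ((H.toNat : Nat) : Int) := by omega
  unfold dpA
  rw [hWN, hHM, hW1, hH1]
  have hinv := foldA_outer okx oky M N M (le_refl M) _ (InvA_init okx oky M N (by omega) (by omega))
  rw [hWc, hHc, hinv.2 H.toNat W.toNat (by omega) (by omega), if_pos (by omega)]
  rw [Int.toNat_natCast, Int.toNat_natCast]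

-- B side.  What one frontier item pc contributes to key k of the next frontier
def contribB (okx oky : Array (Array Int)) (W H : Int) (pc : (Int × Int) × Int) (k : Int × Int) : Int :=
  (if (pc.1.1 < W ∧ get2 okx pc.1.2 (pc.1.1 + 1) ≠ 0) ∧ k = (pc.1.1 + 1, pc.1.2) then pc.2 else 0)
  + (if (pc.1.2 < H ∧ get2 oky (pc.1.2 + 1) pc.1.1 ≠ 0) ∧ k = (pc.1.1, pc.1.2 + 1) then pc.2 else 0)

-- invariant of B's frontier loop after d steps: keys are in-range cells of
-- anti-diagonal d, and looking a cell up yields its fok count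
def InvB (okx oky : Array (Array Int)) (W' H' : Nat) (d : Nat)
    (cur : PySem.Dict (Int × Int) Int) : Prop :=
  cur.keys.Nodup ∧
  (∀ p ∈ cur.keys, ∃ x y : Nat, p = ((x : Int), (y : Int)) ∧ x + y = d ∧ x ≤ W' ∧ y ≤ H') ∧
  (∀ x y : Nat, x + y = d → x ≤ W' → y ≤ H' →
    cur.getD ((x : Int), (y : Int)) 0 = fok okx oky y x)

theorem getD_modify_if (nxt : PySem.Dict (Int × Int) Int) (C : Prop) [Decidable C]
    (t : Int × Int) (c : Int) (k : Int × Int) :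
    (if C then nxt.modify t 0 (· + c) else nxt).getD k 0
      = nxt.getD k 0 + (if C ∧ k = t then c else 0) := by
  by_cases hc : C
  · rw [if_pos hc, PySem.Dict.getD_modify]
    by_cases he : k = t
    · rw [if_pos he, if_pos ⟨hc, he⟩, he]
    · rw [if_neg he, if_neg (fun h => he h.2), add_zero]
  · rw [if_neg hc, if_neg (fun h => hc h.1), add_zero]

theorem pushB_getD (okx oky : Array (Array Int)) (W H : Int)
    (nxt : PySem.Dict (Int × Int) Int) (pc : (Int × Int) × Int) (k : Int × Int) :
    (pushB okx oky W H nxt pc).getD k 0 = nxt.getD k 0 + contribB okx oky W H pc k := by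
  simp only [pushB]
  rw [getD_modify_if, getD_modify_if, contribB, add_assoc]

theorem foldB_getD (okx oky : Array (Array Int)) (W H : Int) (k : Int × Int) :
    ∀ (l : List ((Int × Int) × Int)) (nxt : PySem.Dict (Int × Int) Int),
    (l.foldl (pushB okx oky W H) nxt).getD k 0
      = nxt.getD k 0 + (l.map (fun pc => contribB okx oky W H pc k)).sum := by
  intro l
  induction l with
  | nil => intro nxt; simp
  | cons pc rest ih =>
      intro nxt
      rw [List.foldl_cons, ih, pushB_getD, List.map_cons, List.sum_cons]
      ring

theorem mem_keys_pushB (okx oky : Array (Array Int)) (W H : Int)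
    (nxt : PySem.Dict (Int × Int) Int) (pc : (Int × Int) × Int) (k : Int × Int)
    (h : k ∈ (pushB okx oky W H nxt pc).keys) :
    k ∈ nxt.keys
    ∨ ((pc.1.1 < W ∧ get2 okx pc.1.2 (pc.1.1 + 1) ≠ 0) ∧ k = (pc.1.1 + 1, pc.1.2))
    ∨ ((pc.1.2 < H ∧ get2 oky (pc.1.2 + 1) pc.1.1 ≠ 0) ∧ k = (pc.1.1, pc.1.2 + 1)) := by
  rw [pushB] at h
  split_ifs at h with h1 h2 h2 <;>
    (try simp only [PySem.Dict.keys_modify, PySem.Dict.mem_keys_insert] at h) <;> tauto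

theorem nodup_keys_pushB (okx oky : Array (Array Int)) (W H : Int)
    (nxt : PySem.Dict (Int × Int) Int) (pc : (Int × Int) × Int)
    (h : nxt.keys.Nodup) : (pushB okx oky W H nxt pc).keys.Nodup := by
  rw [pushB]
  split_ifs <;>
    (try simp only [PySem.Dict.keys_modify]) <;>
    first
      | exact PySem.Dict.nodup_keys_insert _ _ _ (PySem.Dict.nodup_keys_insert _ _ _ h)
      | exact PySem.Dict.nodup_keys_insert _ _ _ h
      | exact h

theorem mem_keys_foldB (okx oky : Array (Array Int)) (W H : Int) (k : Int × Int) :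
    ∀ (l : List ((Int × Int) × Int)) (nxt : PySem.Dict (Int × Int) Int),
    k ∈ (l.foldl (pushB okx oky W H) nxt).keys →
    k ∈ nxt.keys ∨ ∃ pc ∈ l,
      ((pc.1.1 < W ∧ get2 okx pc.1.2 (pc.1.1 + 1) ≠ 0) ∧ k = (pc.1.1 + 1, pc.1.2))
      ∨ ((pc.1.2 < H ∧ get2 oky (pc.1.2 + 1) pc.1.1 ≠ 0) ∧ k = (pc.1.1, pc.1.2 + 1)) := by
  intro l
  induction l with
  | nil => intro nxt h; exact Or.inl h
  | cons pc rest ih =>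
      intro nxt h
      rw [List.foldl_cons] at h
      rcases ih _ h with h' | ⟨pc', hmem, hc⟩
      · rcases mem_keys_pushB okx oky W H nxt pc k h' with h'' | hc | hc
        · exact Or.inl h''
        · exact Or.inr ⟨pc, List.mem_cons_self, Or.inl hc⟩
        · exact Or.inr ⟨pc, List.mem_cons_self, Or.inr hc⟩
      · exact Or.inr ⟨pc', List.mem_cons_of_mem _ hmem, hc⟩

theorem nodup_keys_foldB (okx oky : Array (Array Int)) (W H : Int) :
    ∀ (l : List ((Int × Int) × Int)) (nxt : PySem.Dict (Int × Int) Int),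
    nxt.keys.Nodup → (l.foldl (pushB okx oky W H) nxt).keys.Nodup := by
  intro l
  induction l with
  | nil => intro nxt h; exact h
  | cons pc rest ih =>
      intro nxt h
      exact ih _ (nodup_keys_pushB okx oky W H nxt pc h)

theorem sum_zero_of_ne (p0 : Int × Int) (P : (Int × Int) → Prop) [DecidablePred P] :
    ∀ l : List ((Int × Int) × Int), p0 ∉ l.map (fun x => x.1) →
    (l.map (fun pc => if P pc.1 ∧ pc.1 = p0 then pc.2 else 0)).sum = 0 := by
  intro l
  induction l with
  | nil => intro _; simp
  | cons pc rest ih =>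
      intro hmem
      rw [List.map_cons] at hmem
      rw [List.map_cons, List.sum_cons, ih (fun h => hmem (List.mem_cons_of_mem _ h)),
        if_neg (fun hc => hmem (by rw [← hc.2]; exact List.mem_cons_self)), zero_add]

theorem sum_if_eq_key (P : (Int × Int) → Prop) [DecidablePred P] (p0 : Int × Int) :
    ∀ (l : List ((Int × Int) × Int)), (l.map (fun x => x.1)).Nodup →
    ((l.map (fun pc => if P pc.1 ∧ pc.1 = p0 then pc.2 else 0)).sum : Int)
      = if P p0 then (PySem.Dict.mk l).getD p0 0 else 0 := by
  intro l
  induction l with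
  | nil =>
      intro _
      have h0 : (PySem.Dict.mk ([] : List ((Int × Int) × Int))).getD p0 0 = 0 := by
        apply PySem.Dict.getD_of_not_contains
        rw [PySem.Dict.contains_eq_decide_mem_keys, PySem.Dict.keys_mk]
        simp
      rw [List.map_nil, List.sum_nil, h0, ite_self]
  | cons pc rest ih =>
      intro hnd
      rw [List.map_cons] at hnd
      obtain ⟨hhead, htail⟩ := List.nodup_cons.mp hnd
      have hget : (PySem.Dict.mk (pc :: rest)).getD p0 0
          = if pc.1 = p0 then pc.2 else (PySem.Dict.mk rest).getD p0 0 := by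
        rw [PySem.Dict.getD_eq_get?_getD, PySem.Dict.getD_eq_get?_getD]
        have hmk : (PySem.Dict.mk (pc :: rest)) = (PySem.Dict.mk ((pc.1, pc.2) :: rest)) := rfl
        rw [hmk, PySem.Dict.get?_mk_cons]
        by_cases he : pc.1 = p0
        · rw [if_pos he, if_pos (beq_iff_eq.mpr he)]
          rfl
        · rw [if_neg he, if_neg (by simp [he])]
      rw [List.map_cons, List.sum_cons, hget]
      by_cases he : pc.1 = p0
      · subst he
        rw [sum_zero_of_ne _ P rest hhead, add_zero, if_pos rfl]
        by_cases hP : P pc.1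
        · rw [if_pos ⟨hP, rfl⟩, if_pos hP]
        · rw [if_neg (fun hc => hP hc.1), if_neg hP]
      · rw [if_neg he, if_neg (fun hc => he hc.2), zero_add, ih htail]

theorem stepB_getD (okx oky : Array (Array Int)) (W H : Int)
    (cur : PySem.Dict (Int × Int) Int) (hnd : cur.keys.Nodup) (k : Int × Int) :
    (stepB okx oky W H cur).getD k 0
      = (if k.1 - 1 < W ∧ get2 okx k.2 (k.1 - 1 + 1) ≠ 0 then cur.getD (k.1 - 1, k.2) 0 else 0)
      + (if k.2 - 1 < H ∧ get2 oky (k.2 - 1 + 1) k.1 ≠ 0 then cur.getD (k.1, k.2 - 1) 0 else 0) := by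
  obtain ⟨l⟩ := cur
  rw [PySem.Dict.keys_mk] at hnd
  rw [stepB, foldB_getD, PySem.Dict.getD_empty, zero_add]
  have hsum : (PySem.Dict.mk l).items = l := rfl
  rw [hsum]
  have hsplit : (l.map (fun pc => contribB okx oky W H pc k)).sum
      = (l.map (fun pc =>
          if (fun p : Int × Int => p.1 < W ∧ get2 okx p.2 (p.1 + 1) ≠ 0) pc.1 ∧ pc.1 = (k.1 - 1, k.2) then pc.2 else 0)).sum
      + (l.map (fun pc =>
          if (fun p : Int × Int => p.2 < H ∧ get2 oky (p.2 + 1) p.1 ≠ 0) pc.1 ∧ pc.1 = (k.1, k.2 - 1) then pc.2 else 0)).sum := by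
    rw [← PySem.List.sum_map_add_int]
    apply congrArg
    apply List.map_congr_left
    intro pc _
    rw [contribB]
    have e1 : (k = (pc.1.1 + 1, pc.1.2)) ↔ (pc.1 = (k.1 - 1, k.2)) := by
      rw [Prod.ext_iff, Prod.ext_iff]
      constructor
      · rintro ⟨ha, hb⟩; exact ⟨by simp at ha ⊢; omega, by simp at hb ⊢; omega⟩
      · rintro ⟨ha, hb⟩; exact ⟨by simp at ha ⊢; omega, by simp at hb ⊢; omega⟩
    have e2 : (k = (pc.1.1, pc.1.2 + 1)) ↔ (pc.1 = (k.1, k.2 - 1)) := by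
      rw [Prod.ext_iff, Prod.ext_iff]
      constructor
      · rintro ⟨ha, hb⟩; exact ⟨by simp at ha ⊢; omega, by simp at hb ⊢; omega⟩
      · rintro ⟨ha, hb⟩; exact ⟨by simp at ha ⊢; omega, by simp at hb ⊢; omega⟩
    have c1 : ((pc.1.1 < W ∧ get2 okx pc.1.2 (pc.1.1 + 1) ≠ 0) ∧ k = (pc.1.1 + 1, pc.1.2))
        ↔ ((fun p : Int × Int => p.1 < W ∧ get2 okx p.2 (p.1 + 1) ≠ 0) pc.1 ∧ pc.1 = (k.1 - 1, k.2)) := by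
      simp only [and_congr_right_iff]
      intro _
      exact e1
    have c2 : ((pc.1.2 < H ∧ get2 oky (pc.1.2 + 1) pc.1.1 ≠ 0) ∧ k = (pc.1.1, pc.1.2 + 1))
        ↔ ((fun p : Int × Int => p.2 < H ∧ get2 oky (p.2 + 1) p.1 ≠ 0) pc.1 ∧ pc.1 = (k.1, k.2 - 1)) := by
      simp only [and_congr_right_iff]
      intro _
      exact e2
    rw [if_congr c1 rfl rfl, if_congr c2 rfl rfl]
  rw [hsplit,
    sum_if_eq_key (fun p : Int × Int => p.1 < W ∧ get2 okx p.2 (p.1 + 1) ≠ 0) (k.1 - 1, k.2) l hnd,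
    sum_if_eq_key (fun p : Int × Int => p.2 < H ∧ get2 oky (p.2 + 1) p.1 ≠ 0) (k.1, k.2 - 1) l hnd]

theorem notmem_neg_key (W' H' : Nat) (d : Nat)
    (cur : PySem.Dict (Int × Int) Int)
    (hkeys : ∀ p ∈ cur.keys, ∃ x y : Nat, p = ((x : Int), (y : Int)) ∧ x + y = d ∧ x ≤ W' ∧ y ≤ H')
    (p0 : Int × Int) (hneg : p0.1 < 0 ∨ p0.2 < 0) : cur.getD p0 0 = 0 := by
  apply PySem.Dict.getD_of_not_contains
  rw [PySem.Dict.contains_eq_decide_mem_keys]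
  simp only [decide_eq_false_iff_not]
  intro hmem
  obtain ⟨x, y, hp, _, _, _⟩ := hkeys p0 hmem
  rcases hneg with h | h <;> rw [hp] at h <;> simp at h <;> omega

theorem stepB_inv (okx oky : Array (Array Int)) (W H : Int) (W' H' : Nat)
    (hW : W = (W' : Int)) (hH : H = (H' : Int)) (d : Nat)
    (cur : PySem.Dict (Int × Int) Int) (h : InvB okx oky W' H' d cur) :
    InvB okx oky W' H' (d + 1) (stepB okx oky W H cur) := by
  obtain ⟨hnd, hkeys, hval⟩ := h
  refine ⟨?_, ?_, ?_⟩
  · exact nodup_keys_foldB okx oky W H cur.items PySem.Dict.empty (by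
      simp [PySem.Dict.keys_empty])
  · intro p hp
    rcases mem_keys_foldB okx oky W H p cur.items PySem.Dict.empty hp with h' | ⟨pc, hmem, hc⟩
    · rw [PySem.Dict.keys_empty] at h'
      exact absurd h' (List.not_mem_nil)
    · obtain ⟨x, y, hp1, hd, hx, hy⟩ :=
        hkeys pc.1 (PySem.Dict.mem_keys_of_mem_items cur hmem)
      rcases hc with ⟨⟨hlt, _⟩, hk⟩ | ⟨⟨hlt, _⟩, hk⟩
      · refine ⟨x + 1, y, ?_, by omega, ?_, hy⟩
        · rw [hk, hp1]
          simp
        · rw [hp1] at hlt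
          simp only [hW] at hlt
          have : x < W' := by exact_mod_cast hlt
          omega
      · refine ⟨x, y + 1, ?_, by omega, hx, ?_⟩
        · rw [hk, hp1]
          simp
        · rw [hp1] at hlt
          simp only [hH] at hlt
          have : y < H' := by exact_mod_cast hlt
          omega
  · intro a b hd ha hb
    rw [stepB_getD okx oky W H cur hnd]
    simp only
    have hab : ¬ (a = 0 ∧ b = 0) := by omega
    rw [fok_step okx oky b a hab]
    have term1 : (if ((a : Int)) - 1 < W ∧ get2 okx (b : Int) (((a : Int)) - 1 + 1) ≠ 0
          then cur.getD (((a : Int)) - 1, (b : Int)) 0 else 0)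
        = (if 0 < ((a : Int)) ∧ get2 okx (b : Int) (a : Int) ≠ 0 then fok okx oky b (a - 1) else 0) := by
      have hsimp : ((a : Int)) - 1 + 1 = (a : Int) := by ring
      rw [hsimp]
      by_cases ha0 : a = 0
      · subst ha0
        have hzero : cur.getD (((0 : Nat) : Int) - 1, (b : Int)) 0 = 0 :=
          notmem_neg_key W' H' d cur hkeys _ (Or.inl (by simp))
        rw [hzero, ite_self, if_neg (by simp)]
      · have h1a : 1 ≤ a := by omega
        have hcast : ((a : Int)) - 1 = ((a - 1 : Nat) : Int) := by push_cast [h1a]; ring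
        have hlt : ((a : Int)) - 1 < W := by rw [hW, hcast]; exact_mod_cast (by omega : a - 1 < W')
        have hgv : cur.getD (((a : Int)) - 1, (b : Int)) 0 = fok okx oky b (a - 1) := by
          rw [hcast]; exact hval (a - 1) b (by omega) (by omega) hb
        by_cases hc : get2 okx (b : Int) (a : Int) ≠ 0
        · rw [if_pos ⟨hlt, hc⟩, if_pos ⟨by exact_mod_cast (by omega : 0 < a), hc⟩, hgv]
        · rw [if_neg (fun hx => hc hx.2), if_neg (fun hx => hc hx.2)]
    have term2 : (if ((b : Int)) - 1 < H ∧ get2 oky (((b : Int)) - 1 + 1) (a : Int) ≠ 0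
          then cur.getD ((a : Int), ((b : Int)) - 1) 0 else 0)
        = (if 0 < ((b : Int)) ∧ get2 oky (b : Int) (a : Int) ≠ 0 then fok okx oky (b - 1) a else 0) := by
      have hsimp : ((b : Int)) - 1 + 1 = (b : Int) := by ring
      rw [hsimp]
      by_cases hb0 : b = 0
      · subst hb0
        have hzero : cur.getD ((a : Int), ((0 : Nat) : Int) - 1) 0 = 0 :=
          notmem_neg_key W' H' d cur hkeys _ (Or.inr (by simp))
        rw [hzero, ite_self, if_neg (by simp)]
      · have h1b : 1 ≤ b := by omega
        have hcast : ((b : Int)) - 1 = ((b - 1 : Nat) : Int) := by push_cast [h1b]; ring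
        have hlt : ((b : Int)) - 1 < H := by rw [hH, hcast]; exact_mod_cast (by omega : b - 1 < H')
        have hgv : cur.getD ((a : Int), ((b : Int)) - 1) 0 = fok okx oky (b - 1) a := by
          rw [hcast]; exact hval a (b - 1) (by omega) ha (by omega)
        by_cases hc : get2 oky (b : Int) (a : Int) ≠ 0
        · rw [if_pos ⟨hlt, hc⟩, if_pos ⟨by exact_mod_cast (by omega : 0 < b), hc⟩, hgv]
        · rw [if_neg (fun hx => hc hx.2), if_neg (fun hx => hc hx.2)]
    rw [term1, term2]

theorem invB_init (okx oky : Array (Array Int)) (W' H' : Nat) :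
    InvB okx oky W' H' 0 (PySem.Dict.ofList [(((0 : Int), (0 : Int)), (1 : Int))]) := by
  refine ⟨PySem.Dict.nodup_keys_ofList _, ?_, ?_⟩
  · intro p hp
    have hk : (PySem.Dict.ofList [(((0 : Int), (0 : Int)), (1 : Int))]).keys = [((0 : Int), (0 : Int))] := by
      decide
    rw [hk] at hp
    rcases List.mem_singleton.mp hp with h
    exact ⟨0, 0, by rw [h]; simp, rfl, by omega, by omega⟩
  · intro x y hd _ _
    have hx : x = 0 := by omega
    have hy : y = 0 := by omega
    subst hx; subst hy
    have : (PySem.Dict.ofList [(((0 : Int), (0 : Int)), (1 : Int))]).getD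
        (((0 : Nat) : Int), ((0 : Nat) : Int)) 0 = 1 := by decide
    rw [this]
    simp [fok]

theorem foldB_outer (okx oky : Array (Array Int)) (W H : Int) (W' H' : Nat)
    (hW : W = (W' : Int)) (hH : H = (H' : Int)) :
    ∀ n : Nat, InvB okx oky W' H' n
      ((PySem.List.pyRange 0 (n : Int) 1).foldl (fun cur _ => stepB okx oky W H cur)
        (PySem.Dict.ofList [(((0 : Int), (0 : Int)), (1 : Int))])) := by
  intro n
  induction n with
  | zero =>
      simp only [Nat.cast_zero]
      rw [PySem.List.pyRange_one_eq_nil (le_refl 0)]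
      exact invB_init okx oky W' H'
  | succ n ih =>
      have hc : ((n + 1 : Nat) : Int) = (n : Int) + 1 := by push_cast; ring
      rw [hc, PySem.List.pyRange_one_succ_right (by positivity), List.foldl_append,
        List.foldl_cons, List.foldl_nil]
      exact stepB_inv okx oky W H W' H' hW hH n _ ih

theorem solveAlt_eq_fok (okx oky : Array (Array Int)) (W H : Int) (hW : 0 ≤ W) (hH : 0 ≤ H) :
    (((PySem.List.pyRange 0 (W + H) 1).foldl (fun cur _ => stepB okx oky W H cur)
      (PySem.Dict.ofList [(((0 : Int), (0 : Int)), (1 : Int))])).getD (W, H) 0)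
    = fok okx oky H.toNat W.toNat := by
  have hWc : W = ((W.toNat : Nat) : Int) := by omega
  have hHc : H = ((H.toNat : Nat) : Int) := by omega
  have hWH : W + H = ((W.toNat + H.toNat : Nat) : Int) := by omega
  have hinv := foldB_outer okx oky W H W.toNat H.toNat hWc hHc (W.toNat + H.toNat)
  have hfin := hinv.2.2 W.toNat H.toNat rfl (le_refl _) (le_refl _)
  rw [hWH, show ((W, H) : Int × Int) = (((W.toNat : Nat) : Int), ((H.toNat : Nat) : Int)) by
    rw [← hWc, ← hHc]]
  exact hfin

-- ===== VERDICT (by name: the statement is the Claim_ definition above) =====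
theorem solve_spec : Claim_equal_solve := by
  intro W H Ks _ hpre
  unfold Spec_solve solve solve_alt
  rw [dpA_eq_fok _ _ W H hpre.1 hpre.2.1, solveAlt_eq_fok _ _ W H hpre.1 hpre.2.1]
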